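-- pv_equiv track=rewrite | github.com/voxx7codehub-oss/python- | -.py | move_hyphen
-- ===== SOURCE A (Python) =====
-- def move_hyphen(s):
--     if s is None:
--         return None
--
--     hyphens = s.count('-')
--     result = '-' * hyphens
--
--     for ch in s:
--         if ch != '-':
--             result += ch
--
--     return result
-- ===== SOURCE B (Python) =====
-- def move_hyphen(s):
--     if s is None:
--         return None
--     return ''.join(sorted(s, key=lambda c: c != '-'))
-- ===== Notes on version B (the rewrite author's own statement) =====
-- stated objective: idiomatic
-- what changed: Replaces the count-then-append loop (count hyphens, build a hyphen prefix, then re-scan appending the other characters) with a single stable sort keyed on whether a character is a hyphen, which floats all hyphens to the front in one expression.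
import Mathlib
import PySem

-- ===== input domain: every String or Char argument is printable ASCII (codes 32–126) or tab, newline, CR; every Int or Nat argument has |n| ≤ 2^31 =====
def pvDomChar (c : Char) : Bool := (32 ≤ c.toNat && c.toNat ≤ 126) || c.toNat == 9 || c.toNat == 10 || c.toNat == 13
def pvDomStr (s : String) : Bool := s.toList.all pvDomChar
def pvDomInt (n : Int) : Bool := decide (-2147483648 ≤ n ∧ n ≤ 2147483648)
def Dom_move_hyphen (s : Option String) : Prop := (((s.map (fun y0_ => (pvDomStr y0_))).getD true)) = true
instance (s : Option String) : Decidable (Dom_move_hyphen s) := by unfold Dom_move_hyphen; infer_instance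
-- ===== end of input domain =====

-- B replaces A's count-then-append loop with one stable sort keyed on "is not a hyphen" (idiomatic).


-- ===== PORT A =====
def move_hyphen (s : Option String) : Option String :=
  match s with
  | none => none
  | some s =>
      let hyphens : Nat := PySem.Str.count s "-"
      let result : List Char := PySem.List.pyRepeat ['-'] (hyphens : Int)   -- '-' * hyphens
      let result := s.toList.foldl (fun r ch => if ch != '-' then r ++ [ch] else r) result
      some (String.mk result)

-- ===== PORT B =====
def move_hyphen_alt (s : Option String) : Option String :=
  match s with
  | none => none
  | some s => some (String.mk (PySem.List.sorted s.toList (fun c => c != '-')))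

-- ===== PRECONDITION & SPEC =====
def Spec_move_hyphen (s : Option String) (out : Option String) : Prop := out = move_hyphen_alt s
instance (s : Option String) (out : Option String) : Decidable (Spec_move_hyphen s out) := by unfold Spec_move_hyphen; infer_instance

-- ===== CLAIM (what is proved, stated in full; the proofs are below) =====
def Claim_equal_move_hyphen : Prop := ∀ (s : Option String), Dom_move_hyphen s → Spec_move_hyphen s (move_hyphen s)

-- ===== LEMMAS AND PROOFS =====

-- inserting a hyphen into (hyphens H ++ non-hyphens T) puts it at the end of H
theorem pv_insert_hy (H T : List Char) (hH : ∀ c ∈ H, c = '-') (hT : ∀ c ∈ T, c ≠ '-') :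
    PySem.List.insertBy (fun a b => decide ((a != '-') < (b != '-'))) '-' (H ++ T) =
      H ++ '-' :: T := by
  induction H with
  | nil =>
    cases T with
    | nil => rfl
    | cons y ys =>
      have hy : (y != '-') = true := bne_iff_ne.mpr (hT y (by simp))
      have hb : decide ((('-' : Char) != '-') < (y != '-')) = true := by
        rw [hy]; decide
      simp only [List.nil_append, PySem.List.insertBy, hb, if_true]
  | cons h H' ih =>
    have hh : h = '-' := hH h (by simp)
    subst hh
    simp only [List.cons_append, PySem.List.insertBy]
    rw [if_neg (by decide)]
    rw [ih (fun c hc => hH c (by simp [hc]))]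

-- inserting a non-hyphen appends it at the end
theorem pv_insert_non (x : Char) (hx : x ≠ '-') (L : List Char) :
    PySem.List.insertBy (fun a b => decide ((a != '-') < (b != '-'))) x L = L ++ [x] := by
  induction L with
  | nil => rfl
  | cons y ys ih =>
    have hxt : (x != '-') = true := bne_iff_ne.mpr hx
    have hb : decide ((x != '-') < (y != '-')) = false := by
      rw [hxt]; cases (y != '-') <;> decide
    simp only [PySem.List.insertBy, hb, Bool.false_eq_true, if_false]
    rw [ih]
    simp

-- loop invariant for the insertion-sort fold of B
theorem pv_fold_invariant (l H T : List Char) (hH : ∀ c ∈ H, c = '-') (hT : ∀ c ∈ T, c ≠ '-') :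
    l.foldl (fun acc x =>
        PySem.List.insertBy (fun a b => decide ((a != '-') < (b != '-'))) x acc) (H ++ T) =
      (H ++ l.filter (· == '-')) ++ (T ++ l.filter (· != '-')) := by
  induction l generalizing H T with
  | nil => simp
  | cons c l ih =>
    by_cases hc : c = '-'
    · subst hc
      simp only [List.foldl_cons, pv_insert_hy H T hH hT]
      have hsplit : H ++ '-' :: T = (H ++ ['-']) ++ T := by simp
      have hH' : ∀ c ∈ H ++ ['-'], c = '-' := by
        intro x hx
        rcases List.mem_append.1 hx with h | h
        · exact hH x h
        · simpa using h
      rw [hsplit, ih (H ++ ['-']) T hH' hT]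
      simp [List.filter_cons]
    · simp only [List.foldl_cons, pv_insert_non c hc (H ++ T)]
      have hsplit : (H ++ T) ++ [c] = H ++ (T ++ [c]) := by simp
      have hT' : ∀ x ∈ T ++ [c], x ≠ '-' := by
        intro x hx
        rcases List.mem_append.1 hx with h | h
        · exact hT x h
        · simp at h; simpa [h] using hc
      rw [hsplit, ih H (T ++ [c]) hH hT']
      simp [List.filter_cons, hc]

-- B's sort is: the hyphens (in order) then the non-hyphens (in order)
theorem pv_sorted_partition (l : List Char) :
    PySem.List.sorted l (fun c => c != '-') =
      l.filter (· == '-') ++ l.filter (· != '-') := by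
  have := pv_fold_invariant l [] [] (by simp) (by simp)
  simpa [PySem.List.sorted] using this

-- A's append loop is: the seed then the non-hyphens (in order)
theorem pv_fold_append (l init : List Char) :
    l.foldl (fun r ch => if ch != '-' then r ++ [ch] else r) init =
      init ++ l.filter (· != '-') := by
  induction l generalizing init with
  | nil => simp
  | cons c l ih =>
    simp only [List.foldl_cons]
    by_cases hc : c = '-'
    · subst hc
      rw [if_neg (by simp), ih]
      simp
    · rw [if_pos (by simp [hc]), ih]
      simp [List.filter_cons, hc]

theorem pv_count_go (l : List Char) (fuel acc : Nat) (h : l.length ≤ fuel) :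
    PySem.Chars.count.go ['-'] fuel l acc = acc + l.count '-' := by
  induction l generalizing fuel acc with
  | nil => cases fuel <;> simp [PySem.Chars.count.go]
  | cons c t ih =>
    cases fuel with
    | zero => simp at h
    | succ f =>
      by_cases hc : c = '-'
      · subst hc
        simp only [PySem.Chars.count.go, List.isPrefixOf, beq_self_eq_true, Bool.true_and]
        simp only [List.length_cons, List.drop_succ_cons, List.length_nil, List.drop_zero, if_true]
        rw [ih f (acc + 1) (by simpa using h)]
        simp
        omega
      · simp only [PySem.Chars.count.go]
        rw [if_neg (by simp [List.isPrefixOf, Ne.symm hc])]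
        rw [ih f acc (by simpa using h)]
        simp [List.count_cons]
        exact hc

-- Python s.count('-') for the single-character needle is the character count
theorem pv_str_count (s : String) : PySem.Str.count s "-" = s.toList.count '-' := by
  simp only [PySem.Str.count_eq]
  have : ("-" : String).toList = ['-'] := rfl
  rw [this]
  have hne : (['-'] : List Char).isEmpty = false := rfl
  simp only [PySem.Chars.count, hne, Bool.false_eq_true, if_false]
  simpa using pv_count_go s.toList s.toList.length 0 le_rfl

-- ===== VERDICT (by name: the statement is the Claim_ definition above) =====
theorem move_hyphen_spec : Claim_equal_move_hyphen := by
  intro s _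
  unfold Spec_move_hyphen move_hyphen move_hyphen_alt
  cases s with
  | none => rfl
  | some s =>
    simp only [pv_sorted_partition, pv_fold_append]
    have h1 : PySem.List.pyRepeat ['-'] ((PySem.Str.count s "-" : Nat) : Int) =
        s.toList.filter (· == '-') := by
      rw [PySem.List.pyRepeat_singleton, pv_str_count]
      simp only [Int.toNat_natCast]
      exact (List.filter_beq (l := s.toList) '-').symm
    rw [h1]
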